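-- pv_equiv track=rewrite | github.com/Defelo/AdventOfCode | Python/lib/grid.py | iter_line
-- ===== SOURCE A (Python) =====
-- def iter_line(x1, y1, x2, y2):
--     xr = range(min(x1, x2), max(x1, x2) + 1)
--     if x1 > x2:
--         xr = xr[::-1]
--
--     yr = range(min(y1, y2), max(y1, y2) + 1)
--     if y1 > y2:
--         yr = yr[::-1]
--
--     if x1 == x2:
--         xr = [x1] * len(yr)
--     if y1 == y2:
--         yr = [y1] * len(xr)
--
--     for x, y in zip(xr, yr):
--         yield x, y
-- ===== SOURCE B (Python) =====
-- def iter_line(x1, y1, x2, y2):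
--     sx = (x2 > x1) - (x2 < x1)
--     sy = (y2 > y1) - (y2 < y1)
--     if x1 == x2:
--         n = abs(y1 - y2) + 1
--     elif y1 == y2:
--         n = abs(x1 - x2) + 1
--     else:
--         n = min(abs(x1 - x2), abs(y1 - y2)) + 1
--     for i in range(n):
--         yield (x1 + i * sx, y1 + i * sy)
-- ===== Notes on version B (the rewrite author's own statement) =====
-- stated objective: simpler
-- what changed: Replaces the two min/max ranges with conditional reversal, constant-list substitution and zip truncation by computing step directions sx,sy and a point count n, then stepping (x1+i*sx, y1+i*sy) directly for i in range(n).
import Mathlib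
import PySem

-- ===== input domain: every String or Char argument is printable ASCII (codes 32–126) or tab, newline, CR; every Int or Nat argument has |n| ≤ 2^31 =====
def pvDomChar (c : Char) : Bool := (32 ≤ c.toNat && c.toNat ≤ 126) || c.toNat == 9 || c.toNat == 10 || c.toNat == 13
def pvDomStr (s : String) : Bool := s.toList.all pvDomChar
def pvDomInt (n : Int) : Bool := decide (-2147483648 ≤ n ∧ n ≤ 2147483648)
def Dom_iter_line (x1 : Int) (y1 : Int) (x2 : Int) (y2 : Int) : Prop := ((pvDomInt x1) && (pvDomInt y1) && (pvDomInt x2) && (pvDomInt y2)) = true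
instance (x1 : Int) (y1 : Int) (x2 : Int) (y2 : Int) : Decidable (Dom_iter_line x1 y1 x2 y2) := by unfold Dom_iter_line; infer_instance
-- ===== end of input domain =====

-- B replaces A's range-reversal/constant-list/zip machinery by direct incremental
-- stepping (x1+i*sx, y1+i*sy) for a computed point count n: simpler decomposition.

-- ===== PORT A =====
-- A's `range` values are modelled, like Python's lazy range objects, as arithmetic
-- sequences (start, step, len): exact for range(a,b), for its [::-1] slice
-- (start+ (len-1)*step, -step, len), and for the list [x]*n as the step-0 sequence;
-- zip materializes the first min(len,len) elements, exactly Python's zip.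
def pvMkRange (a b : Int) : Int × Int × Nat := (a, 1, (b - a).toNat)

def pvRevSeq (r : Int × Int × Nat) : Int × Int × Nat :=
  (r.1 + ((r.2.2 : Int) - 1) * r.2.1, -r.2.1, r.2.2)

def pvConstSeq (x : Int) (n : Nat) : Int × Int × Nat := (x, 0, n)

def pvSeqGet (r : Int × Int × Nat) (i : Nat) : Int := r.1 + i * r.2.1

def pvZipSeq (r s : Int × Int × Nat) : List (Int × Int) :=
  (List.range (min r.2.2 s.2.2)).map (fun i => (pvSeqGet r i, pvSeqGet s i))

def iter_line (x1 : Int) (y1 : Int) (x2 : Int) (y2 : Int) : List (Int × Int) :=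
  let xr0 := pvMkRange (min x1 x2) (max x1 x2 + 1)
  let xr1 := if x1 > x2 then pvRevSeq xr0 else xr0
  let yr0 := pvMkRange (min y1 y2) (max y1 y2 + 1)
  let yr1 := if y1 > y2 then pvRevSeq yr0 else yr0
  let xr2 := if x1 = x2 then pvConstSeq x1 yr1.2.2 else xr1
  let yr2 := if y1 = y2 then pvConstSeq y1 xr2.2.2 else yr1
  pvZipSeq xr2 yr2

-- ===== PORT B =====
def iter_line_alt (x1 : Int) (y1 : Int) (x2 : Int) (y2 : Int) : List (Int × Int) :=
  let sx : Int := (if x2 > x1 then 1 else 0) - (if x2 < x1 then 1 else 0)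
  let sy : Int := (if y2 > y1 then 1 else 0) - (if y2 < y1 then 1 else 0)
  let n : Int :=
    if x1 = x2 then |y1 - y2| + 1
    else if y1 = y2 then |x1 - x2| + 1
    else min |x1 - x2| |y1 - y2| + 1
  (PySem.List.pyRange 0 n 1).map (fun i => (x1 + i * sx, y1 + i * sy))

-- ===== PRECONDITION & SPEC =====
def Spec_iter_line (x1 : Int) (y1 : Int) (x2 : Int) (y2 : Int) (out : List (Int × Int)) : Prop := out = iter_line_alt x1 y1 x2 y2
instance (x1 : Int) (y1 : Int) (x2 : Int) (y2 : Int) (out : List (Int × Int)) : Decidable (Spec_iter_line x1 y1 x2 y2 out) := by unfold Spec_iter_line; infer_instance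

-- ===== CLAIM (what is proved, stated in full; the proofs are below) =====
def Claim_equal_iter_line : Prop := ∀ (x1 : Int) (y1 : Int) (x2 : Int) (y2 : Int), Dom_iter_line x1 y1 x2 y2 → Spec_iter_line x1 y1 x2 y2 (iter_line x1 y1 x2 y2)

-- ===== LEMMAS AND PROOFS =====
lemma map_range_eq (n m : Nat) (f g : Nat → Int × Int) (hnm : n = m)
    (hfg : ∀ i < n, f i = g i) :
    (List.range n).map f = (List.range m).map g := by
  subst hnm
  apply List.map_congr_left
  intro i hi
  exact hfg i (List.mem_range.mp hi)

-- ===== VERDICT (by name: the statement is the Claim_ definition above) =====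
theorem iter_line_spec : Claim_equal_iter_line := by
  intro x1 y1 x2 y2 _
  unfold Spec_iter_line
  simp only [iter_line, iter_line_alt]
  rcases lt_trichotomy x1 x2 with hx | hx | hx <;>
    rcases lt_trichotomy y1 y2 with hy | hy | hy <;>
    [ simp only [gt_iff_lt, hx, hy, hx.ne, hy.ne, lt_asymm hx, lt_asymm hy,
        min_eq_left hx.le, max_eq_right hx.le, min_eq_left hy.le, max_eq_right hy.le,
        if_true, if_false];
      (subst hy;
       simp only [gt_iff_lt, hx, hx.ne, lt_asymm hx, lt_self_iff_false,
        min_eq_left hx.le, max_eq_right hx.le, if_true, if_false]);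
      simp only [gt_iff_lt, hx, hy, hx.ne, hy.ne', lt_asymm hx, lt_asymm hy,
        min_eq_left hx.le, max_eq_right hx.le, min_eq_right hy.le, max_eq_left hy.le,
        if_true, if_false];
      (subst hx;
       simp only [gt_iff_lt, hy, hy.ne, lt_asymm hy, lt_self_iff_false,
        min_eq_left hy.le, max_eq_right hy.le, if_true, if_false]);
      (subst hx; subst hy;
       simp only [gt_iff_lt, lt_self_iff_false, min_self, max_self, if_true, if_false]);
      (subst hx;
       simp only [gt_iff_lt, hy, hy.ne', lt_asymm hy, lt_self_iff_false,
        min_eq_right hy.le, max_eq_left hy.le, if_true, if_false]);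
      simp only [gt_iff_lt, hx, hy, hx.ne', hy.ne, lt_asymm hx, lt_asymm hy,
        min_eq_right hx.le, max_eq_left hx.le, min_eq_left hy.le, max_eq_right hy.le,
        if_true, if_false];
      (subst hy;
       simp only [gt_iff_lt, hx, hx.ne', lt_asymm hx, lt_self_iff_false,
        min_eq_right hx.le, max_eq_left hx.le, if_true, if_false]);
      simp only [gt_iff_lt, hx, hy, hx.ne', hy.ne', lt_asymm hx, lt_asymm hy,
        min_eq_right hx.le, max_eq_left hx.le, min_eq_right hy.le, max_eq_left hy.le,
        if_true, if_false] ] <;>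
    simp only [pvMkRange, pvRevSeq, pvConstSeq, pvZipSeq, pvSeqGet,
      PySem.List.pyRange_one, List.map_map] <;>
    apply map_range_eq <;>
    first
      | (simp only [abs_eq_max_neg, neg_sub]
         omega)
      | (intro i hi
         simp only [Function.comp, Prod.mk.injEq]
         constructor <;> omega)
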